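-- pv_equiv track=rewrite | github.com/blinduandi/AA_Lab | Lab 2/visualization.py | heap_sort_gen
-- ===== SOURCE A (Python) =====
-- def heap_sort_gen(array):
--     def heapify(arr, n, i):
--         l = 2*i + 1
--         r = 2*i + 2
--         if l < n:
--             yield (arr.copy(), [i, l])
--         if r < n:
--             yield (arr.copy(), [i, r])
--         largest = i
--         if l < n and arr[l] > arr[largest]:
--             largest = l
--         if r < n and arr[r] > arr[largest]:
--             largest = r
--         if largest != i:
--             arr[i], arr[largest] = arr[largest], arr[i]
--             yield (arr.copy(), [i, largest])
--             yield from heapify(arr, n, largest)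
--     n = len(array)
--     for i in range(n//2-1, -1, -1):
--         yield from heapify(array, n, i)
--     for i in range(n-1, 0, -1):
--         array[0], array[i] = array[i], array[0]
--         yield (array.copy(), [0, i])
--         yield from heapify(array, i, 0)
-- ===== SOURCE B (Python) =====
-- def heap_sort_gen(array):
--     n = len(array)
--     # flat work list: every sift start and every extract step, computed up front
--     jobs = [('sift', n, i) for i in range(n // 2 - 1, -1, -1)]
--     jobs += [('extract', end) for end in range(n - 1, 0, -1)]
--     for job in jobs:
--         if job[0] == 'extract':
--             end = job[1]
--             array[0], array[end] = array[end], array[0]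
--             yield (array.copy(), [0, end])
--             size, i = end, 0
--         else:
--             _, size, i = job
--         # iterative sift-down with the comparison snapshot merged into the selection
--         while True:
--             l, r = 2 * i + 1, 2 * i + 2
--             big = i
--             if l < size:
--                 yield (array.copy(), [i, l])
--                 if array[l] > array[big]:
--                     big = l
--             if r < size:
--                 yield (array.copy(), [i, r])
--                 if array[r] > array[big]:
--                     big = r
--             if big == i:
--                 break
--             array[i], array[big] = array[big], array[i]
--             yield (array.copy(), [i, big])
--             i = big
-- ===== Notes on version B (the rewrite author's own statement) =====
-- stated objective: alternative
-- what changed: A's recursive heapify driven by two separate loops is replaced by a flat precomputed job list (sift starts + extract steps) processed by one dispatch loop whose iterative sift-down merges each comparison snapshot with its selection update.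
import Mathlib
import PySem

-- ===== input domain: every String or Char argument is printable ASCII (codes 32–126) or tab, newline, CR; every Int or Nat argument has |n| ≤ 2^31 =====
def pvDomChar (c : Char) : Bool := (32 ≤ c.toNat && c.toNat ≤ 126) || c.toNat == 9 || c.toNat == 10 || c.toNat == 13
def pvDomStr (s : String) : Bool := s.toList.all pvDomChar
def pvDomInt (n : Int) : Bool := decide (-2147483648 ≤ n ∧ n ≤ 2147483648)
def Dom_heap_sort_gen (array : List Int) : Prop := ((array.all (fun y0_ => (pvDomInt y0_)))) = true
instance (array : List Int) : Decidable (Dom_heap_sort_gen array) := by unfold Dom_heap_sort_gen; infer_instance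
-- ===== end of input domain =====

-- B replaces A's recursive heapify + two driver loops with a flat precomputed job list
-- processed by one dispatch loop whose sift-down merges comparison snapshot and selection;
-- both mutate the input list in Python — the equivalence proved is about the yielded snapshots.


-- ===== PORT A =====
-- arr[k] with k a range-guarded non-negative in-range index (exact there)
def pvGet (arr : List Int) (k : Nat) : Int := arr.getD k 0

-- Python's 'arr[i], arr[j] = arr[j], arr[i]' (both reads happen before the writes)
def pvSwap (arr : List Int) (i j : Nat) : List Int :=
  (arr.set i (pvGet arr j)).set j (pvGet arr i)

-- A's recursive heapify; the yielded snapshots are collected in the second component.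
-- fuel only makes the recursion total: the chain of indices i < largest < … < n is
-- strictly increasing, so fuel = n (the caller's heap size bound) is never exhausted.
def heapifyA : Nat → List Int → Nat → Nat → List Int × List (List Int × List Int)
  | 0, arr, _, _ => (arr, [])
  | fuel+1, arr, n, i =>
    let l := 2*i+1
    let r := 2*i+2
    let s1 : List (List Int × List Int) := if l < n then [(arr, [(i:Int), (l:Int)])] else []
    let s2 : List (List Int × List Int) := if r < n then [(arr, [(i:Int), (r:Int)])] else []
    let largest1 := if l < n ∧ pvGet arr l > pvGet arr i then l else i
    let largest := if r < n ∧ pvGet arr r > pvGet arr largest1 then r else largest1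
    if largest ≠ i then
      let arr' := pvSwap arr i largest
      let rec_ := heapifyA fuel arr' n largest
      (rec_.1, s1 ++ s2 ++ [(arr', [(i:Int), (largest:Int)])] ++ rec_.2)
    else (arr, s1 ++ s2)

-- range(n//2-1,-1,-1) is ported as the reversed list [0,…,n/2-1];
-- range(n-1,0,-1) as the reversed list [1,…,n-1] (exact: both are Nat-valued).
def heap_sort_gen (array : List Int) : List (List Int × List Int) :=
  let n := array.length
  let st1 := ((List.range (n/2)).reverse).foldl
    (fun (st : List Int × List (List Int × List Int)) i =>
      ((heapifyA n st.1 n i).1, st.2 ++ (heapifyA n st.1 n i).2)) (array, [])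
  let st2 := ((List.range' 1 (n-1)).reverse).foldl
    (fun (st : List Int × List (List Int × List Int)) i =>
      let a' := pvSwap st.1 0 i
      ((heapifyA n a' i 0).1, st.2 ++ [(a', [(0:Int), (i:Int)])] ++ (heapifyA n a' i 0).2)) st1
  st2.2

-- ===== PORT B =====
-- B's work items, precomputed up front like Source B's jobs list
inductive PvJob
  | sift (size i : Nat)
  | extract (e : Nat)

-- B's merged sift-down while-loop: one accumulator-carrying tail recursion where each
-- comparison snapshot is immediately followed by its update of 'big'; fuel as in heapifyA.
def siftB : Nat → List Int → Nat → Nat → List (List Int × List Int) → List Int × List (List Int × List Int)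
  | 0, arr, _, _, acc => (arr, acc)
  | fuel+1, arr, size, i, acc =>
    let l := 2*i+1
    let r := 2*i+2
    let (acc1, big1) :=
      if l < size then
        (acc ++ [(arr, [(i:Int), (l:Int)])], if pvGet arr l > pvGet arr i then l else i)
      else (acc, i)
    let (acc2, big) :=
      if r < size then
        (acc1 ++ [(arr, [(i:Int), (r:Int)])], if pvGet arr r > pvGet arr big1 then r else big1)
      else (acc1, big1)
    if big = i then (arr, acc2)
    else
      let arr' := pvSwap arr i big
      siftB fuel arr' size big (acc2 ++ [(arr', [(i:Int), (big:Int)])])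

-- dispatch of one job of Source B's loop body (n is the fuel bound for the sift loop)
def pvStep (n : Nat) (st : List Int × List (List Int × List Int)) (j : PvJob) :
    List Int × List (List Int × List Int) :=
  match j with
  | .sift size i => siftB n st.1 size i st.2
  | .extract e =>
    let a' := pvSwap st.1 0 e
    siftB n a' e 0 (st.2 ++ [(a', [(0:Int), (e:Int)])])

def heap_sort_gen_alt (array : List Int) : List (List Int × List Int) :=
  let n := array.length
  let jobs := ((List.range (n/2)).reverse).map (fun i => PvJob.sift n i)
      ++ ((List.range' 1 (n-1)).reverse).map PvJob.extract
  (jobs.foldl (pvStep n) (array, [])).2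

-- ===== PRECONDITION & SPEC =====
def Spec_heap_sort_gen (array : List Int) (out : List (List Int × List Int)) : Prop := out = heap_sort_gen_alt array
instance (array : List Int) (out : List (List Int × List Int)) : Decidable (Spec_heap_sort_gen array out) := by unfold Spec_heap_sort_gen; infer_instance

-- ===== CLAIM (what is proved, stated in full; the proofs are below) =====
def Claim_equal_heap_sort_gen : Prop := ∀ (array : List Int), Dom_heap_sort_gen array → Spec_heap_sort_gen array (heap_sort_gen array)

-- ===== LEMMAS AND PROOFS =====
-- B's merged sift loop computes exactly A's recursive heapify, with the
-- accumulator prefixed to A's snapshot list.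
theorem siftB_eq_heapifyA : ∀ (fuel : Nat) (arr : List Int) (n i : Nat) (acc : List (List Int × List Int)),
    siftB fuel arr n i acc = ((heapifyA fuel arr n i).1, acc ++ (heapifyA fuel arr n i).2) := by
  intro fuel
  induction fuel with
  | zero => intro arr n i acc; simp [siftB, heapifyA]
  | succ fuel ih =>
    intro arr n i acc
    simp only [siftB, heapifyA]
    split_ifs with h1 h2 h3 <;> simp_all [List.append_assoc] <;> omega

theorem heap_sort_gen_eq_alt (array : List Int) :
    heap_sort_gen array = heap_sort_gen_alt array := by
  unfold heap_sort_gen heap_sort_gen_alt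
  simp only [List.foldl_append, List.foldl_map, pvStep, siftB_eq_heapifyA]

-- ===== VERDICT (by name: the statement is the Claim_ definition above) =====
theorem heap_sort_gen_spec : Claim_equal_heap_sort_gen := by
  intro array _
  unfold Spec_heap_sort_gen
  exact heap_sort_gen_eq_alt array
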